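-- pv_equiv track=rewrite | github.com/QinyangTan/dashsys-workshop-vldb.github.io | dashagent/evidence_policy.py | allowed_required_families
-- ===== SOURCE A (Python) =====
-- API_ONLY_FAMILIES = {
--     "audit_create_events",
--     "batch_details",
--     "batch_export_files",
--     "batch_list",
--     "dataset_audit_changes",
--     "datasets_by_schema",
--     "destination_audit_events",
--     "merge_policies",
--     "observability_metrics",
--     "profile_enabled_experience_event_schemas",
--     "recent_batches",
--     "recent_segment_definitions",
--     "segment_definition_count",
--     "segment_definition_list",
--     "segment_jobs",
--     "schema_by_name",
--     "schema_list",
--     "successful_batch_count",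
--     "tag_categories",
--     "tag_count",
--     "tag_details_by_id",
--     "tag_list",
--     "tags_by_uncategorized_category",
-- }
--
-- def allowed_required_families(families: list[str]) -> list[str]:
--     if "tag_categories" in families or "tags_by_uncategorized_category" in families:
--         return [family for family in families if family in {"tag_categories", "tags_by_uncategorized_category"}]
--     if "datasets_by_schema" in families or "schema_registry_by_id" in families:
--         return [family for family in families if family in {"datasets_by_schema", "schema_registry_by_id"}]
--     if "audience_by_destination_id" in families or "destination_flows" in families:
--         return [family for family in families if family in {"audience_by_destination_id", "destination_flows"}]
--     return [family for family in families if family in API_ONLY_FAMILIES] or families[:1]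
-- ===== SOURCE B (Python) =====
-- API_ONLY_FAMILIES = {
--     "audit_create_events",
--     "batch_details",
--     "batch_export_files",
--     "batch_list",
--     "dataset_audit_changes",
--     "datasets_by_schema",
--     "destination_audit_events",
--     "merge_policies",
--     "observability_metrics",
--     "profile_enabled_experience_event_schemas",
--     "recent_batches",
--     "recent_segment_definitions",
--     "segment_definition_count",
--     "segment_definition_list",
--     "segment_jobs",
--     "schema_by_name",
--     "schema_list",
--     "successful_batch_count",
--     "tag_categories",
--     "tag_count",
--     "tag_details_by_id",
--     "tag_list",
--     "tags_by_uncategorized_category",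
-- }
--
-- # priority index: each special family mapped to the rank of its precedence group
-- _GROUP_OF = {
--     "tag_categories": 0,
--     "tags_by_uncategorized_category": 0,
--     "datasets_by_schema": 1,
--     "schema_registry_by_id": 1,
--     "audience_by_destination_id": 2,
--     "destination_flows": 2,
-- }
--
-- def allowed_required_families(families: list[str]) -> list[str]:
--     # best-ranked precedence group present, computed in one pass via the index
--     best = min((_GROUP_OF[f] for f in families if f in _GROUP_OF), default=None)
--     if best is not None:
--         return [f for f in families if _GROUP_OF.get(f) == best]
--     api = [f for f in families if f in API_ONLY_FAMILIES]
--     return api if api else families[:1]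
-- ===== Notes on version B (the rewrite author's own statement) =====
-- stated objective: alternative
-- what changed: Instead of testing three unrolled membership branches in order, B builds a dict mapping each special family to its precedence-group rank, takes the minimum rank present in one pass, and filters families whose rank equals that minimum; the API-only/first-element fallback is unchanged.
import Mathlib
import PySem

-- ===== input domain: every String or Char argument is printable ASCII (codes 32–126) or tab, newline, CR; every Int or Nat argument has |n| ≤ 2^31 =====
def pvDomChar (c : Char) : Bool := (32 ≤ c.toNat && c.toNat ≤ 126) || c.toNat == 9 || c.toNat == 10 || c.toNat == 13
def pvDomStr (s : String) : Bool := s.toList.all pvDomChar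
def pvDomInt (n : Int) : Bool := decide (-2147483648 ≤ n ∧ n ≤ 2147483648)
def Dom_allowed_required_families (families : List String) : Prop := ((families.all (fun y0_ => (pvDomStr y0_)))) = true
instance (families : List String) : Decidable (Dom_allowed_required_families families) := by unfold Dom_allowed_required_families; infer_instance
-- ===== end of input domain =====

-- B replaces A's chain of unrolled branches by a priority index (family → group
-- rank) and one min-pass choosing the best rank present (objective: alternative).

-- ===== PORT A =====
-- Python set literal API_ONLY_FAMILIES, as the list of its distinct elements
def apiOnlyFamilies : List String :=
  ["audit_create_events", "batch_details", "batch_export_files", "batch_list",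
   "dataset_audit_changes", "datasets_by_schema", "destination_audit_events",
   "merge_policies", "observability_metrics",
   "profile_enabled_experience_event_schemas", "recent_batches",
   "recent_segment_definitions", "segment_definition_count",
   "segment_definition_list", "segment_jobs", "schema_by_name", "schema_list",
   "successful_batch_count", "tag_categories", "tag_count", "tag_details_by_id",
   "tag_list", "tags_by_uncategorized_category"]

def allowed_required_families (families : List String) : List String :=
  if families.contains "tag_categories" || families.contains "tags_by_uncategorized_category" then
    families.filter (fun family => family == "tag_categories" || family == "tags_by_uncategorized_category")
  else if families.contains "datasets_by_schema" || families.contains "schema_registry_by_id" then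
    families.filter (fun family => family == "datasets_by_schema" || family == "schema_registry_by_id")
  else if families.contains "audience_by_destination_id" || families.contains "destination_flows" then
    families.filter (fun family => family == "audience_by_destination_id" || family == "destination_flows")
  else
    let r := families.filter (fun family => apiOnlyFamilies.contains family)
    if r.isEmpty then families.take 1 else r   -- Python: `list or families[:1]`

-- ===== PORT B =====
-- the Python dict literal _GROUP_OF: special family → rank of its precedence group
def groupOf : PySem.Dict String Int :=
  PySem.Dict.mk
    [("tag_categories", 0), ("tags_by_uncategorized_category", 0),
     ("datasets_by_schema", 1), ("schema_registry_by_id", 1),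
     ("audience_by_destination_id", 2), ("destination_flows", 2)]

def allowed_required_families_alt (families : List String) : List String :=
  -- best = min((_GROUP_OF[f] for f in families if f in _GROUP_OF), default=None)
  let best := PySem.List.min? (families.filterMap (fun f => groupOf.get? f)) (fun g => g)
  match best with
  | some b => families.filter (fun f => groupOf.get? f == some b)
  | none =>
      let api := families.filter (fun f => apiOnlyFamilies.contains f)
      if api.isEmpty then families.take 1 else api

-- ===== PRECONDITION & SPEC =====
def Spec_allowed_required_families (families : List String) (out : List String) : Prop := out = allowed_required_families_alt families
instance (families : List String) (out : List String) : Decidable (Spec_allowed_required_families families out) := by unfold Spec_allowed_required_families; infer_instance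

-- ===== CLAIM (what is proved, stated in full; the proofs are below) =====
def Claim_equal_allowed_required_families : Prop := ∀ (families : List String), Dom_allowed_required_families families → Spec_allowed_required_families families (allowed_required_families families)

-- ===== LEMMAS AND PROOFS =====

-- the 6-entry lookup, evaluated to a chain of string comparisons
theorem groupOf_eval (f : String) : groupOf.get? f =
    if f = "tag_categories" then some 0
    else if f = "tags_by_uncategorized_category" then some 0
    else if f = "datasets_by_schema" then some 1
    else if f = "schema_registry_by_id" then some 1
    else if f = "audience_by_destination_id" then some 2
    else if f = "destination_flows" then some 2
    else none := by
  simp only [groupOf, PySem.Dict.get?_mk_cons, beq_iff_eq]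
  split_ifs <;> subst_vars <;> first | rfl | simp_all

theorem groupOf_mem_some (f : String) (g : Int) (h : groupOf.get? f = some g) :
    g = 0 ∨ g = 1 ∨ g = 2 := by
  rw [groupOf_eval] at h; split_ifs at h <;> simp_all

theorem groupOf_eq0 (f : String) : groupOf.get? f = some 0 ↔
    f = "tag_categories" ∨ f = "tags_by_uncategorized_category" := by
  rw [groupOf_eval]; split_ifs <;> simp_all
theorem groupOf_eq1 (f : String) : groupOf.get? f = some 1 ↔
    f = "datasets_by_schema" ∨ f = "schema_registry_by_id" := by
  rw [groupOf_eval]; split_ifs <;> simp_all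
theorem groupOf_eq2 (f : String) : groupOf.get? f = some 2 ↔
    f = "audience_by_destination_id" ∨ f = "destination_flows" := by
  rw [groupOf_eval]; split_ifs <;> simp_all

-- abbreviation used only in the proofs: the ranks present in `families`
def ranks (families : List String) : List Int :=
  families.filterMap (fun f => groupOf.get? f)

theorem mem_ranks (families : List String) (g : Int) :
    g ∈ ranks families ↔ ∃ f ∈ families, groupOf.get? f = some g := by
  simp [ranks, List.mem_filterMap]

theorem contains2_iff (families : List String) (a b : String) :
    (families.contains a || families.contains b) = true ↔
      ∃ f ∈ families, f = a ∨ f = b := by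
  simp only [Bool.or_eq_true, List.contains_eq_mem, decide_eq_true_eq]
  constructor
  · rintro (h | h); exacts [⟨a, h, Or.inl rfl⟩, ⟨b, h, Or.inr rfl⟩]
  · rintro ⟨f, hf, rfl | rfl⟩; exacts [Or.inl hf, Or.inr hf]

theorem min?_ranks_eq (families : List String) (g : Int)
    (hmem : g ∈ ranks families)
    (hmin : ∀ g' ∈ ranks families, g ≤ g') :
    PySem.List.min? (ranks families) (fun x => x) = some g := by
  rcases h : PySem.List.min? (ranks families) (fun x => x) with _ | m
  · rw [PySem.List.min?_eq_none_iff] at h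
    rw [h] at hmem; cases hmem
  · have hm := PySem.List.min?_mem h
    have h1 := PySem.List.min?_isMin h g hmem
    have h2 := hmin m hm
    have : m = g := le_antisymm h1 h2
    rw [this]

theorem filter_beq_eq (families : List String) (b : Int)
    (a c : String)
    (hb : ∀ f, groupOf.get? f = some b ↔ f = a ∨ f = c) :
    families.filter (fun f => groupOf.get? f == some b)
      = families.filter (fun f => f == a || f == c) := by
  apply List.filter_congr
  intro f _
  rw [Bool.eq_iff_iff]
  simp [hb f]

-- ===== VERDICT (by name: the statement is the Claim_ definition above) =====
theorem allowed_required_families_spec : Claim_equal_allowed_required_families := by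
  intro families _
  unfold Spec_allowed_required_families allowed_required_families allowed_required_families_alt
  by_cases c0 : (families.contains "tag_categories" || families.contains "tags_by_uncategorized_category") = true
  · have h0 : (0 : Int) ∈ ranks families := by
      rw [mem_ranks]
      obtain ⟨f, hf, hfe⟩ := (contains2_iff families _ _).mp c0
      exact ⟨f, hf, (groupOf_eq0 f).mpr hfe⟩
    have hmin : PySem.List.min? (ranks families) (fun x => x) = some 0 := by
      apply min?_ranks_eq _ _ h0
      intro g' hg'
      rw [mem_ranks] at hg'
      obtain ⟨f, _, hfe⟩ := hg'
      rcases groupOf_mem_some f g' hfe with rfl | rfl | rfl <;> omega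
    simp only [ranks] at hmin
    rw [c0, if_pos rfl, hmin]
    exact (filter_beq_eq families 0 _ _ groupOf_eq0).symm
  · by_cases c1 : (families.contains "datasets_by_schema" || families.contains "schema_registry_by_id") = true
    · have h1 : (1 : Int) ∈ ranks families := by
        rw [mem_ranks]
        obtain ⟨f, hf, hfe⟩ := (contains2_iff families _ _).mp c1
        exact ⟨f, hf, (groupOf_eq1 f).mpr hfe⟩
      have hn0 : (0 : Int) ∉ ranks families := by
        intro h
        rw [mem_ranks] at h
        obtain ⟨f, hf, hfe⟩ := h
        exact c0 ((contains2_iff families _ _).mpr ⟨f, hf, (groupOf_eq0 f).mp hfe⟩)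
      have hmin : PySem.List.min? (ranks families) (fun x => x) = some 1 := by
        apply min?_ranks_eq _ _ h1
        intro g' hg'
        have hg'' := hg'
        rw [mem_ranks] at hg''
        obtain ⟨f, _, hfe⟩ := hg''
        rcases groupOf_mem_some f g' hfe with rfl | rfl | rfl
        · exact absurd hg' hn0
        · omega
        · omega
      simp only [ranks] at hmin
      rw [eq_false_of_ne_true c0, if_neg (by simp), c1, if_pos rfl, hmin]
      exact (filter_beq_eq families 1 _ _ groupOf_eq1).symm
    · by_cases c2 : (families.contains "audience_by_destination_id" || families.contains "destination_flows") = true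
      · have h2 : (2 : Int) ∈ ranks families := by
          rw [mem_ranks]
          obtain ⟨f, hf, hfe⟩ := (contains2_iff families _ _).mp c2
          exact ⟨f, hf, (groupOf_eq2 f).mpr hfe⟩
        have hn0 : (0 : Int) ∉ ranks families := by
          intro h
          rw [mem_ranks] at h
          obtain ⟨f, hf, hfe⟩ := h
          exact c0 ((contains2_iff families _ _).mpr ⟨f, hf, (groupOf_eq0 f).mp hfe⟩)
        have hn1 : (1 : Int) ∉ ranks families := by
          intro h
          rw [mem_ranks] at h
          obtain ⟨f, hf, hfe⟩ := h
          exact c1 ((contains2_iff families _ _).mpr ⟨f, hf, (groupOf_eq1 f).mp hfe⟩)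
        have hmin : PySem.List.min? (ranks families) (fun x => x) = some 2 := by
          apply min?_ranks_eq _ _ h2
          intro g' hg'
          have hg'' := hg'
          rw [mem_ranks] at hg''
          obtain ⟨f, _, hfe⟩ := hg''
          rcases groupOf_mem_some f g' hfe with rfl | rfl | rfl
          · exact absurd hg' hn0
          · exact absurd hg' hn1
          · omega
        simp only [ranks] at hmin
        rw [eq_false_of_ne_true c0, if_neg (by simp), eq_false_of_ne_true c1,
          if_neg (by simp), c2, if_pos rfl, hmin]
        exact (filter_beq_eq families 2 _ _ groupOf_eq2).symm
      · have hnil : ranks families = [] := by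
          rcases h : ranks families with _ | ⟨g, t⟩
          · rfl
          · exfalso
            have hg : g ∈ ranks families := by rw [h]; exact List.mem_cons_self ..
            rw [mem_ranks] at hg
            obtain ⟨f, hf, hfe⟩ := hg
            rcases groupOf_mem_some f g hfe with rfl | rfl | rfl
            · exact c0 ((contains2_iff families _ _).mpr ⟨f, hf, (groupOf_eq0 f).mp hfe⟩)
            · exact c1 ((contains2_iff families _ _).mpr ⟨f, hf, (groupOf_eq1 f).mp hfe⟩)
            · exact c2 ((contains2_iff families _ _).mpr ⟨f, hf, (groupOf_eq2 f).mp hfe⟩)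
        have hmin : PySem.List.min? (ranks families) (fun x : Int => x) = none := by
          rw [PySem.List.min?_eq_none_iff]; exact hnil
        simp only [ranks] at hmin
        rw [eq_false_of_ne_true c0, if_neg (by simp), eq_false_of_ne_true c1,
          if_neg (by simp), eq_false_of_ne_true c2, if_neg (by simp), hmin]
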